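-- pv_equiv track=rewrite | github.com/SE-UoM/r-quality-analyzer | r_quality_analyzer/domain/metrics/base.py | is_code_line
-- ===== SOURCE A (Python) =====
-- def is_code_line(line: str) -> bool:
--     """Return True if line is code (ignores blanks/comments)."""
--     stripped = line.strip()
--     if not stripped or stripped.startswith("#"):
--         return False
--     in_single = False
--     in_double = False
--     for idx, char in enumerate(stripped):
--         if char == "'" and (idx == 0 or stripped[idx - 1] != "\\"):
--             in_single = not in_single
--         elif char == '"' and (idx == 0 or stripped[idx - 1] != "\\"):
--             in_double = not in_double
--         elif char == "#" and not in_single and not in_double: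
--             stripped = stripped[:idx].strip()
--             break
--     return bool(stripped)
-- ===== SOURCE B (Python) =====
-- def is_code_line(line: str) -> bool:
--     """Return True if line is code (ignores blanks/comments)."""
--     stripped = line.strip()
--     return bool(stripped) and not stripped.startswith("#")
-- ===== Notes on version B (the rewrite author's own statement) =====
-- stated objective: simpler
-- what changed: Dropped A's per-character quote/comment state machine entirely (it can never change the result: a stripped non-comment line stays non-empty even after comment truncation) and replaced it with a two-condition closed form on the stripped line.
import Mathlib
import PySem

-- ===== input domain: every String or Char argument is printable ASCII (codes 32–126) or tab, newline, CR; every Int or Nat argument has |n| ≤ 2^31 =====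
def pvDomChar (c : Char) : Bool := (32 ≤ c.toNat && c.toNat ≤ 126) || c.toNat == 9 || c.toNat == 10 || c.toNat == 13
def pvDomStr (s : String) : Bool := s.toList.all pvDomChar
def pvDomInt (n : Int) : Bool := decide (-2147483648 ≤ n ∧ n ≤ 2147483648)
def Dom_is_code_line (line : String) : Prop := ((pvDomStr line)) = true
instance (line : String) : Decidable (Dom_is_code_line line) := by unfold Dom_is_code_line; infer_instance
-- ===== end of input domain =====

-- B drops A's quote/comment state machine (dead code for the return value) for a two-condition closed form; objective: simpler.

-- ===== PORT A =====
-- the for-loop over enumerate(stripped) with the in_single/in_double flags; the '#' branch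
-- truncates-and-strips and breaks, otherwise the original stripped survives
def isCodeLoopA (stripped : List Char) : List (Int × Char) → Bool → Bool → List Char
  | [], _, _ => stripped
  | (idx, c) :: rest, in_single, in_double =>
    if c == '\'' && (idx == 0 || PySem.List.pyGet? stripped (idx - 1) != some '\\') then
      isCodeLoopA stripped rest (!in_single) in_double
    else if c == '"' && (idx == 0 || PySem.List.pyGet? stripped (idx - 1) != some '\\') then
      isCodeLoopA stripped rest in_single (!in_double)
    else if c == '#' && !in_single && !in_double then
      PySem.Chars.strip (PySem.List.slice stripped none (some idx))
    else
      isCodeLoopA stripped rest in_single in_double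

def is_code_line (line : String) : Bool :=
  let stripped := PySem.Chars.strip line.toList
  if stripped.isEmpty || PySem.Chars.startswith stripped ['#'] then false
  else
    let stripped2 := isCodeLoopA stripped (PySem.List.enumerate stripped 0) false false
    !stripped2.isEmpty

-- ===== PORT B =====
def is_code_line_alt (line : String) : Bool :=
  let stripped := PySem.Str.strip line
  !stripped.toList.isEmpty && !PySem.Str.startswith stripped "#"

-- ===== PRECONDITION & SPEC =====
def Spec_is_code_line (line : String) (out : Bool) : Prop := out = is_code_line_alt line
instance (line : String) (out : Bool) : Decidable (Spec_is_code_line line out) := by unfold Spec_is_code_line; infer_instance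

-- ===== CLAIM (what is proved, stated in full; the proofs are below) =====
def Claim_equal_is_code_line : Prop := ∀ (line : String), Dom_is_code_line line → Spec_is_code_line line (is_code_line line)

-- ===== LEMMAS AND PROOFS =====

lemma dropWhile_cons_pred_false {p : Char → Bool} {l t : List Char} {c : Char}
    (h : List.dropWhile p l = c :: t) : p c = false := by
  induction l with
  | nil => simp at h
  | cons a l ih =>
    by_cases hp : p a
    · simp [List.dropWhile, hp] at h; exact ih h
    · simp [List.dropWhile, hp] at h
      rcases h with ⟨rfl, _⟩
      simpa using hp

lemma rstrip_prefix (l : List Char) : PySem.Chars.rstrip l <+: l := by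
  obtain ⟨p, hp⟩ := List.dropWhile_suffix (l := l.reverse) (p := PySem.Chars.isspace)
  refine ⟨p.reverse, ?_⟩
  unfold PySem.Chars.rstrip
  conv_rhs => rw [← List.reverse_reverse l, ← hp]
  rw [List.reverse_append]

-- the head of a nonempty stripped string is not whitespace
lemma strip_head_not_space {l t : List Char} {c : Char}
    (h : PySem.Chars.strip l = c :: t) : PySem.Chars.isspace c = false := by
  unfold PySem.Chars.strip at h
  obtain ⟨r, hr⟩ := rstrip_prefix (PySem.Chars.lstrip l)
  rw [h] at hr
  exact dropWhile_cons_pred_false (p := PySem.Chars.isspace)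
    (l := l) (by simpa [PySem.Chars.lstrip] using hr.symm)

-- stripping a list whose head is not whitespace gives a nonempty list
lemma strip_cons_ne_nil {c : Char} {t : List Char} (hc : PySem.Chars.isspace c = false) :
    PySem.Chars.strip (c :: t) ≠ [] := by
  unfold PySem.Chars.strip PySem.Chars.lstrip PySem.Chars.rstrip
  simp [hc]
  exact ⟨c, Or.inr rfl, hc⟩

-- A's loop never returns the empty list when the scanned string starts with a
-- non-whitespace character, provided every index in the worklist is ≥ 1
lemma loopA_ne_nil (c : Char) (t : List Char) (hc : PySem.Chars.isspace c = false)
    (l : List (Int × Char)) (hl : ∀ p ∈ l, 1 ≤ p.1) (ins ind : Bool) :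
    isCodeLoopA (c :: t) l ins ind ≠ [] := by
  induction l generalizing ins ind with
  | nil => simp [isCodeLoopA]
  | cons p rest ih =>
    obtain ⟨idx, ch⟩ := p
    have hidx : 1 ≤ idx := hl (idx, ch) (by simp)
    have hrest : ∀ q ∈ rest, 1 ≤ q.1 := fun q hq => hl q (by simp [hq])
    unfold isCodeLoopA
    split_ifs with h1 h2 h3
    · exact ih hrest _ _
    · exact ih hrest _ _
    · -- comment found at idx ≥ 1: the truncated string still contains c
      rw [PySem.List.slice_to (c :: t) (by omega)]
      have htake : (c :: t).take idx.toNat = c :: t.take (idx.toNat - 1) := by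
        have : idx.toNat = (idx.toNat - 1) + 1 := by omega
        rw [this]; simp
      rw [htake]
      exact strip_cons_ne_nil hc
    · exact ih hrest _ _

lemma enumerate_tail_ge_one {α : Type} (xs : List α) :
    ∀ p ∈ PySem.List.enumerate xs 1, 1 ≤ p.1 := by
  intro p hp
  obtain ⟨k, hk, rfl⟩ := (PySem.List.mem_enumerate_iff xs 1 p).mp hp
  omega

-- ===== VERDICT (by name: the statement is the Claim_ definition above) =====
theorem is_code_line_spec : Claim_equal_is_code_line := by
  intro line _
  unfold Spec_is_code_line is_code_line is_code_line_alt
  simp only [PySem.Str.strip, PySem.Str.startswith_eq, String.toList_ofList]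
  cases h : PySem.Chars.strip line.toList with
  | nil => simp
  | cons c t =>
    by_cases hsharp : PySem.Chars.startswith (c :: t) ['#'] = true
    · simp [hsharp]
    · have hcsharp : c ≠ '#' := by
        intro hc
        apply hsharp
        rw [PySem.Chars.startswith_iff]
        exact ⟨t, by simp [hc]⟩
      have hspace : PySem.Chars.isspace c = false := strip_head_not_space h
      simp only [List.isEmpty_cons, Bool.false_or]
      rw [PySem.List.enumerate_cons]
      have hloop : isCodeLoopA (c :: t)
          ((0, c) :: PySem.List.enumerate t 1) false false ≠ [] := by
        unfold isCodeLoopA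
        split_ifs with h1 h2 h3
        · exact loopA_ne_nil c t hspace _ (enumerate_tail_ge_one t) _ _
        · exact loopA_ne_nil c t hspace _ (enumerate_tail_ge_one t) _ _
        · simp at h3
          exact absurd h3 hcsharp
        · exact loopA_ne_nil c t hspace _ (enumerate_tail_ge_one t) _ _
      simpa [hsharp] using hloop
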